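-- pv_equiv track=rewrite | github.com/ComputationalBiomedicineGroup/NovumRNA | bin/final_out_2.py | process_mismatch
-- ===== SOURCE A (Python) =====
-- def process_mismatch(row):
--     if not row or row.strip() == '':
--         return '', '', ''
--     parts = row.split(',')
--     # Splitting parts into three groups
--     SNP, Ref_NT, SNP_pos = [], [], []
--     for i in range(0, len(parts), 3):
--         # Add checks to prevent index errors
--         SNP.append(parts[i] if i < len(parts) else '')
--         Ref_NT.append(parts[i+1] if i+1 < len(parts) else '')
--         SNP_pos.append(parts[i+2] if i+2 < len(parts) else '')
--     return ','.join(SNP), ','.join(Ref_NT), ','.join(SNP_pos)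
-- ===== SOURCE B (Python) =====
-- def process_mismatch(row):
--     if not row or row.strip() == '':
--         return '', '', ''
--     parts = row.split(',')
--     parts = parts + [''] * ((-len(parts)) % 3)
--     return ','.join(parts[0::3]), ','.join(parts[1::3]), ','.join(parts[2::3])
-- ===== Notes on version B (the rewrite author's own statement) =====
-- stated objective: idiomatic
-- what changed: Replaces the single interleaved step-3 loop with three appends per iteration by padding the split list to a multiple of three and taking three extended slices parts[0::3], parts[1::3], parts[2::3].
import Mathlib
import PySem

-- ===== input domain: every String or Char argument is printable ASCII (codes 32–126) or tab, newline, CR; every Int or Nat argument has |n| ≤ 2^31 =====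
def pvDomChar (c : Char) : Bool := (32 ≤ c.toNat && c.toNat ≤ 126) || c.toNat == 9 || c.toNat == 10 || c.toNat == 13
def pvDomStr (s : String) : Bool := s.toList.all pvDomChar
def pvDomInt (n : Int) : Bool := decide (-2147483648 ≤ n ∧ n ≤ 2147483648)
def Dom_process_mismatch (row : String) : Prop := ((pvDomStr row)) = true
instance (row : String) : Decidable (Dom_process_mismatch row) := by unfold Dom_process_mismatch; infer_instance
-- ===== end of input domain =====

-- B pads the split list to a multiple of three and takes three extended slices
-- (parts[0::3], parts[1::3], parts[2::3]) instead of A's interleaved step-3 appending loop (idiomatic; same cost).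


-- ===== PORT A =====
def process_mismatch (row : String) : String × String × String :=
  if row = "" ∨ PySem.Str.strip row = "" then ("", "", "")
  else
    -- row.split(','): split? always returns some here since the separator "," is nonempty
    let parts := (PySem.Str.split? row ",").getD []
    let n : Int := parts.length
    let st := (PySem.List.pyRange 0 n 3).foldl
      (fun (st : List String × List String × List String) i =>
        (st.1 ++ [if i < n then (PySem.List.pyGet? parts i).getD "" else ""],
         st.2.1 ++ [if i + 1 < n then (PySem.List.pyGet? parts (i + 1)).getD "" else ""],
         st.2.2 ++ [if i + 2 < n then (PySem.List.pyGet? parts (i + 2)).getD "" else ""]))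
      ([], [], [])
    (PySem.Str.join "," st.1, PySem.Str.join "," st.2.1, PySem.Str.join "," st.2.2)

-- ===== PORT B =====
def process_mismatch_alt (row : String) : String × String × String :=
  if row = "" ∨ PySem.Str.strip row = "" then ("", "", "")
  else
    -- row.split(','): split? always returns some here since the separator "," is nonempty
    let parts := (PySem.Str.split? row ",").getD []
    -- parts + [''] * ((-len(parts)) % 3)
    let padded := parts ++ List.replicate (PySem.Int.mod (-(parts.length : Int)) 3).toNat ""
    (PySem.Str.join "," ((PySem.List.slice? padded (some 0) none 3).getD []),
     PySem.Str.join "," ((PySem.List.slice? padded (some 1) none 3).getD []),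
     PySem.Str.join "," ((PySem.List.slice? padded (some 2) none 3).getD []))

-- ===== PRECONDITION & SPEC =====
def Spec_process_mismatch (row : String) (out : String × String × String) : Prop := out = process_mismatch_alt row
instance (row : String) (out : String × String × String) : Decidable (Spec_process_mismatch row out) := by unfold Spec_process_mismatch; infer_instance

-- ===== CLAIM (what is proved, stated in full; the proofs are below) =====
def Claim_equal_process_mismatch : Prop := ∀ (row : String), Dom_process_mismatch row → Spec_process_mismatch row (process_mismatch row)

-- ===== LEMMAS AND PROOFS =====

-- the padded list B builds: parts extended with '' to the next multiple of 3
def padded3 (parts : List String) : List String :=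
  parts ++ List.replicate (PySem.Int.mod (-(parts.length : Int)) 3).toNat ""

theorem padded3_length (parts : List String) :
    (padded3 parts).length = 3 * ((parts.length + 2) / 3) := by
  simp only [padded3, List.length_append, List.length_replicate,
    PySem.Int.mod_eq_emod_of_pos (by norm_num : (0:Int) < 3)]
  omega

-- A's guarded lookup at any index i equals getD on B's padded list (out of range both give "")
theorem point (parts : List String) (i : Nat) :
    (if (i : Int) < (parts.length : Int) then (PySem.List.pyGet? parts (i : Int)).getD "" else "")
      = (padded3 parts).getD i "" := by
  by_cases h : i < parts.length
  · rw [if_pos (by exact_mod_cast h)]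
    have hg : (PySem.List.pyGet? parts (i : Int)).getD "" = PySem.List.pyGetD parts (i : Int) "" := rfl
    rw [hg, PySem.List.pyGetD_natCast, padded3, List.getD_append _ _ _ _ h]
  · rw [if_neg (by exact_mod_cast h)]
    rw [padded3, List.getD_append_right _ _ _ _ (by omega)]
    by_cases h2 : i - parts.length < (PySem.Int.mod (-(parts.length : Int)) 3).toNat
    · exact (List.getD_replicate _ h2).symm
    · exact (List.getD_eq_default _ _ (by simpa using Nat.le_of_not_lt h2)).symm

-- xs[j::3] on a list of length 3*m is the m elements at indices j, j+3, …
theorem slice3 (xs : List String) (m j : Nat) (hj : j < 3) (h : xs.length = 3 * m) :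
    (PySem.List.slice? xs (some (j : Int)) none 3).getD []
      = (List.range m).map (fun k => xs.getD (j + 3 * k) "") := by
  unfold PySem.List.slice? PySem.List.sliceIndices
  norm_num [h]
  rw [if_neg (by omega : ¬ (↑j:Int) < 0)]
  have hmin : min (↑j:Int) (3 * ↑m) = if m = 0 then 0 else (↑j:Int) := by
    split_ifs with h0 <;> omega
  rw [hmin]
  by_cases hm : m = 0
  · simp [hm]
  · rw [if_neg hm]
    have hcount : (if (↑j:Int) < 3 * ↑m then ((3 * (↑m:Int) - ↑j + 3 - 1) / 3).toNat else 0) = m := by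
      rw [if_pos (by omega)]; omega
    rw [hcount, ← List.filterMap_eq_map]
    apply List.filterMap_congr
    intro k hk
    simp only [List.mem_range] at hk
    have hidx : ((↑j + 3 * (↑k:Int))).toNat = j + 3 * k := by omega
    rw [hidx, Function.comp_apply]
    rw [List.getElem?_eq_getElem (by omega)]
    simp

-- range(0, n, 3) has exactly ⌈n/3⌉ entries 3k
theorem range3 (n : Nat) :
    PySem.List.pyRange 0 (n : Int) 3
      = (List.range ((n + 2) / 3)).map (fun (k : Nat) => ((3 * k : Nat) : Int)) := by
  rw [PySem.List.pyRange_of_pos _ _ (by norm_num)]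
  have : (if (0:Int) < (n:Int) then (((n:Int) - 0 + 3 - 1) / 3).toNat else 0) = (n + 2) / 3 := by
    split_ifs <;> omega
  rw [this]
  exact List.map_congr_left (fun k _ => by push_cast; ring)

-- A's triple-append loop splits into three independent maps
theorem fold3 {α : Type} (l : List α) (f g h : α → String) (a b c : List String) :
    l.foldl (fun (st : List String × List String × List String) i =>
        (st.1 ++ [f i], st.2.1 ++ [g i], st.2.2 ++ [h i])) (a, b, c)
      = (a ++ l.map f, b ++ l.map g, c ++ l.map h) := by
  induction l generalizing a b c with
  | nil => simp
  | cons x xs ih => simp [ih]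

-- ===== VERDICT (by name: the statement is the Claim_ definition above) =====
theorem process_mismatch_spec : Claim_equal_process_mismatch := by
  intro row _
  unfold Spec_process_mismatch process_mismatch process_mismatch_alt
  split_ifs with hguard
  · rfl
  · dsimp only
    set parts := (PySem.Str.split? row ",").getD [] with hp
    set m := (parts.length + 2) / 3 with hm
    have hpadded : (parts ++ List.replicate (PySem.Int.mod (-(parts.length : Int)) 3).toNat "")
        = padded3 parts := rfl
    rw [hpadded, range3 parts.length, List.foldl_map, fold3]
    have s0 := slice3 (padded3 parts) m 0 (by norm_num) (padded3_length parts)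
    have s1 := slice3 (padded3 parts) m 1 (by norm_num) (padded3_length parts)
    have s2 := slice3 (padded3 parts) m 2 (by norm_num) (padded3_length parts)
    simp only [Nat.cast_zero, Nat.cast_one, Nat.cast_ofNat, zero_add] at s0 s1 s2
    rw [s0, s1, s2]
    simp only [List.nil_append, Prod.mk.injEq]
    refine ⟨?_, ?_, ?_⟩
    · refine congrArg (PySem.Str.join ",") (List.map_congr_left fun k _ => ?_)
      exact point parts (3 * k)
    · refine congrArg (PySem.Str.join ",") (List.map_congr_left fun k _ => ?_)
      have e : ((3 * k : Nat) : Int) + 1 = ((1 + 3 * k : Nat) : Int) := by push_cast; ring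
      rw [e]; exact point parts (1 + 3 * k)
    · refine congrArg (PySem.Str.join ",") (List.map_congr_left fun k _ => ?_)
      have e : ((3 * k : Nat) : Int) + 2 = ((2 + 3 * k : Nat) : Int) := by push_cast; ring
      rw [e]; exact point parts (2 + 3 * k)
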